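-- pv_equiv track=rewrite | github.com/Arsen1302/Code-copy-detector | TestData/solutions/problem_769_3.py | solution_769_3
-- ===== SOURCE A (Python) =====
-- from typing import List
--
-- def solution_769_3(nums: List[int]) -> int:
--     moves_even, moves_odd = 0, 0
--     ldec_even, ldec_odd = 0, 0
--
--     if len(nums) > 1:
--         moves_even += max(0, nums[1] - nums[0] + 1)
--         ldec_even = moves_even
--
--     for i, num in enumerate(nums[1:], 1):
--         if i % 2 == 0:
--             # even
--             moves_even += max(0, nums[i-1] - num - ldec_even + 1)
--             if i+1 < len(nums):
--                 ldec_even = max(0, nums[i+1] - num + 1)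
--                 moves_even += ldec_even
--         else:
--             # odd
--             moves_odd += max(0, nums[i-1] - num - ldec_odd + 1)
--             if i+1 < len(nums):
--                 ldec_odd = max(0, nums[i+1] - num + 1)
--                 moves_odd += ldec_odd
--
--     return min(moves_even, moves_odd)
-- ===== SOURCE B (Python) =====
-- from typing import List
--
-- def solution_769_3(nums: List[int]) -> int:
--     n = len(nums)
--     res = [0, 0]
--     for p in range(2):
--         for i in range(p, n, 2):
--             neighbors = [nums[j] for j in (i - 1, i + 1) if 0 <= j < n]
--             if neighbors:
--                 res[p] += max(0, nums[i] - min(neighbors) + 1)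
--     return min(res[0], res[1])
-- ===== Notes on version B (the rewrite author's own statement) =====
-- stated objective: simpler
-- what changed: Replaces A's single interleaved pass carrying a 'previous decrease' (ldec) state per parity with a stateless per-parity scan that adds, for each index of that parity, the closed-form cost max(0, nums[i] - min(existing neighbors) + 1).
import Mathlib
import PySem

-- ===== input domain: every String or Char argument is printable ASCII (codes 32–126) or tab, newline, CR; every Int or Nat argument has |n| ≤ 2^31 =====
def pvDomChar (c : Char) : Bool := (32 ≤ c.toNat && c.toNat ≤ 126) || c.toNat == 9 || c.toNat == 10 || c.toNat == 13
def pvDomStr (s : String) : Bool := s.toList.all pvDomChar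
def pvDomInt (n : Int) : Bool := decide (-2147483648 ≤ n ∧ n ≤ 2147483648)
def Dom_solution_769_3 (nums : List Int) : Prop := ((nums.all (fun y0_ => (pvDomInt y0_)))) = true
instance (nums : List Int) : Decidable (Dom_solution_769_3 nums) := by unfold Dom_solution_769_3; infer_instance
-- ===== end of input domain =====

-- B replaces A's interleaved pass with a carried 'ldec' state by stateless per-parity
-- sums of the closed-form cost max(0, nums[i] - min(existing neighbors) + 1) (objective: simpler).

-- ===== PORT A =====
-- one loop step of A's for-loop (state = (moves_even, moves_odd, ldec_even, ldec_odd));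
-- all indices accessed are in range, so getD's default is never used
def pvStepA (nums : List Int) (st : Int × Int × Int × Int) (i : Nat) : Int × Int × Int × Int :=
  let n := nums.length
  let (me, mo, le, lo) := st
  let num := nums.getD i 0
  if i % 2 = 0 then
    let me := me + max 0 (nums.getD (i-1) 0 - num - le + 1)
    if i + 1 < n then
      let le := max 0 (nums.getD (i+1) 0 - num + 1)
      (me + le, mo, le, lo)
    else (me, mo, le, lo)
  else
    let mo := mo + max 0 (nums.getD (i-1) 0 - num - lo + 1)
    if i + 1 < n then
      let lo := max 0 (nums.getD (i+1) 0 - num + 1)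
      (me, mo + lo, le, lo)
    else (me, mo, le, lo)

def pvInitA (nums : List Int) : Int × Int × Int × Int :=
  if 1 < nums.length then
    let m := max 0 (nums.getD 1 0 - nums.getD 0 0 + 1)
    (m, 0, m, 0)
  else (0, 0, 0, 0)

def solution_769_3 (nums : List Int) : Int :=
  -- for i, num in enumerate(nums[1:], 1): indices 1 .. len-1
  let st := (List.range' 1 (nums.length - 1)).foldl (pvStepA nums) (pvInitA nums)
  min st.1 st.2.1

-- ===== PORT B =====
-- neighbors = [nums[j] for j in (i-1, i+1) if 0 <= j < n]; cost of index i
def pvCost (nums : List Int) (i : Nat) : Int :=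
  let nbrs := (if 0 < i then [nums.getD (i-1) 0] else []) ++
              (if i + 1 < nums.length then [nums.getD (i+1) 0] else [])
  match nbrs.min? with
  | none => 0
  | some m => max 0 (nums.getD i 0 - m + 1)

-- for i in range(p, n, 2): res[p] += cost(i)
def pvParityCost (nums : List Int) (p : Nat) : Int :=
  (((List.range nums.length).filter (fun i => i % 2 = p))).foldl (fun a i => a + pvCost nums i) 0

def solution_769_3_alt (nums : List Int) : Int :=
  min (pvParityCost nums 0) (pvParityCost nums 1)

-- ===== PRECONDITION & SPEC =====
def Spec_solution_769_3 (nums : List Int) (out : Int) : Prop := out = solution_769_3_alt nums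
instance (nums : List Int) (out : Int) : Decidable (Spec_solution_769_3 nums out) := by unfold Spec_solution_769_3; infer_instance

-- ===== CLAIM (what is proved, stated in full; the proofs are below) =====
def Claim_equal_solution_769_3 : Prop := ∀ (nums : List Int), Dom_solution_769_3 nums → Spec_solution_769_3 nums (solution_769_3 nums)

-- ===== LEMMAS AND PROOFS =====

-- "left cost" of index j: amount to lower nums[j] strictly below its LEFT neighbor
def pvL (nums : List Int) (j : Nat) : Int :=
  max 0 (nums.getD j 0 - nums.getD (j-1) 0 + 1)

-- pending term: pvL j if j is still in range, else 0
def pvP (nums : List Int) (j : Nat) : Int :=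
  if j < nums.length then pvL nums j else 0

-- partial parity sum over indices < m
def pvS (nums : List Int) (p m : Nat) : Int :=
  (((List.range m).filter (fun i => i % 2 = p))).foldl (fun a i => a + pvCost nums i) 0

-- loop invariant for A's fold after processing indices 1..k
def pvInv (nums : List Int) (k : Nat) (st : Int × Int × Int × Int) : Prop :=
  if k % 2 = 1 then
    st.1 = pvS nums 1 (k-1) + pvL nums k ∧
    st.2.1 = pvS nums 0 k + pvP nums (k+1) ∧
    st.2.2.1 = pvL nums k ∧
    (k + 1 < nums.length → st.2.2.2 = pvL nums (k+1))
  else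
    st.1 = pvS nums 1 k + pvP nums (k+1) ∧
    st.2.1 = pvS nums 0 (k-1) + pvL nums k ∧
    st.2.2.2 = pvL nums k ∧
    (k + 1 < nums.length → st.2.2.1 = pvL nums (k+1))

theorem pvS_succ (nums : List Int) (p m : Nat) :
    pvS nums p (m+1) = pvS nums p m + (if m % 2 = p then pvCost nums m else 0) := by
  unfold pvS
  rw [List.range_succ, List.filter_append, List.foldl_append]
  by_cases h : m % 2 = p <;> simp [h]

theorem pvS_skip (nums : List Int) (p m : Nat) (h : ¬ (m % 2 = p)) :
    pvS nums p (m+1) = pvS nums p m := by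
  rw [pvS_succ, if_neg h, add_zero]

theorem pvS_two (nums : List Int) (p m : Nat) (h1 : 1 ≤ m) (hp : m % 2 = p) :
    pvS nums p (m+1) = pvS nums p (m-1) + pvCost nums m := by
  have key := pvS_skip nums p (m-1) (by omega : ¬ ((m-1) % 2 = p))
  rw [pvS_succ, if_pos hp]
  congr 1
  conv_lhs => rw [show m = (m - 1) + 1 by omega]
  exact key

-- interior cost: for 1 ≤ j, j+1 < n
theorem pvCost_interior (nums : List Int) (j : Nat) (h0 : 0 < j) (h1 : j + 1 < nums.length) :
    pvCost nums j = max 0 (max (nums.getD j 0 - nums.getD (j-1) 0 + 1)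
                               (nums.getD j 0 - nums.getD (j+1) 0 + 1)) := by
  unfold pvCost
  rw [if_pos h0, if_pos h1]
  have hm : ([nums.getD (j-1) 0, nums.getD (j+1) 0] : List Int).min?
      = some (min (nums.getD (j-1) 0) (nums.getD (j+1) 0)) := by simp [List.min?]
  simp only [List.singleton_append, hm]
  omega

-- last-index cost: for 1 ≤ j = n-1
theorem pvCost_last (nums : List Int) (j : Nat) (h0 : 0 < j) (h1 : j + 1 = nums.length) :
    pvCost nums j = pvL nums j := by
  unfold pvCost pvL
  rw [if_pos h0, if_neg (by omega : ¬ (j + 1 < nums.length))]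
  simp [List.min?]

-- first-index cost when a right neighbor exists
theorem pvCost_zero (nums : List Int) (h : 1 < nums.length) :
    pvCost nums 0 = max 0 (nums.getD 0 0 - nums.getD 1 0 + 1) := by
  unfold pvCost
  rw [if_neg (by omega : ¬ (0 < 0)), if_pos (by omega : 0 + 1 < nums.length)]
  simp [List.min?]

-- invariant maintained by one loop step
theorem pvInv_step (nums : List Int) (k : Nat) (st : Int × Int × Int × Int)
    (hk : 1 ≤ k) (hkn : k + 1 < nums.length) (h : pvInv nums k st) :
    pvInv nums (k+1) (pvStepA nums st (k+1)) := by
  obtain ⟨me, mo, le, lo⟩ := st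
  have hL2 : pvL nums (k+1+1) = max 0 (nums.getD (k+1+1) 0 - nums.getD (k+1) 0 + 1) := by
    unfold pvL; rw [show k + 1 + 1 - 1 = k + 1 by omega]
  by_cases hp : k % 2 = 1
  · -- k odd, k+1 even: even branch runs
    have hi0 : (k+1) % 2 = 0 := by omega
    have hi1 : ¬ ((k+1) % 2 = 1) := by omega
    unfold pvInv at h
    rw [if_pos hp] at h
    obtain ⟨hme, hmo, hle, hlo⟩ := h
    dsimp only at hme hmo hle hlo
    have hrec : pvS nums 1 (k+1) = pvS nums 1 (k-1) + pvCost nums k :=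
      pvS_two nums 1 k hk hp
    have hmo' : mo = pvS nums 0 k + pvL nums (k+1) := by
      rw [hmo]; unfold pvP; rw [if_pos hkn]
    by_cases hn2 : k + 1 + 1 < nums.length
    · have hstep : pvStepA nums (me, mo, le, lo) (k+1) =
        (me + max 0 (nums.getD k 0 - nums.getD (k+1) 0 - le + 1)
            + max 0 (nums.getD (k+1+1) 0 - nums.getD (k+1) 0 + 1),
         mo,
         max 0 (nums.getD (k+1+1) 0 - nums.getD (k+1) 0 + 1),
         lo) := by
        simp only [pvStepA]
        rw [if_pos hi0, if_pos hn2, show k + 1 - 1 = k by omega]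
      rw [hstep]
      unfold pvInv
      rw [if_neg hi1]
      dsimp only
      refine ⟨?_, ?_, hlo hkn, fun _ => hL2.symm⟩
      · have hP : pvP nums (k+1+1) = pvL nums (k+1+1) := by
          unfold pvP; rw [if_pos hn2]
        rw [hP, hL2, hme, hle, hrec, pvCost_interior nums k (by omega) hkn]
        unfold pvL
        omega
      · rw [show k + 1 - 1 = k by omega]
        exact hmo'
    · have hstep : pvStepA nums (me, mo, le, lo) (k+1) =
        (me + max 0 (nums.getD k 0 - nums.getD (k+1) 0 - le + 1), mo, le, lo) := by
        simp only [pvStepA]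
        rw [if_pos hi0, if_neg hn2, show k + 1 - 1 = k by omega]
      rw [hstep]
      unfold pvInv
      rw [if_neg hi1]
      dsimp only
      refine ⟨?_, ?_, hlo hkn, fun hc => absurd hc hn2⟩
      · have hP : pvP nums (k+1+1) = 0 := by
          unfold pvP; rw [if_neg hn2]
        rw [hP, hme, hle, hrec, pvCost_interior nums k (by omega) hkn]
        unfold pvL
        omega
      · rw [show k + 1 - 1 = k by omega]
        exact hmo'
  · -- k even, k+1 odd: odd branch runs
    have hke : k % 2 = 0 := by omega
    have hi1 : (k+1) % 2 = 1 := by omega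
    have hi0 : ¬ ((k+1) % 2 = 0) := by omega
    unfold pvInv at h
    rw [if_neg hp] at h
    obtain ⟨hme, hmo, hlo, hle⟩ := h
    dsimp only at hme hmo hle hlo
    have hrec : pvS nums 0 (k+1) = pvS nums 0 (k-1) + pvCost nums k :=
      pvS_two nums 0 k hk hke
    have hme' : me = pvS nums 1 k + pvL nums (k+1) := by
      rw [hme]; unfold pvP; rw [if_pos hkn]
    by_cases hn2 : k + 1 + 1 < nums.length
    · have hstep : pvStepA nums (me, mo, le, lo) (k+1) =
        (me,
         mo + max 0 (nums.getD k 0 - nums.getD (k+1) 0 - lo + 1)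
            + max 0 (nums.getD (k+1+1) 0 - nums.getD (k+1) 0 + 1),
         le,
         max 0 (nums.getD (k+1+1) 0 - nums.getD (k+1) 0 + 1)) := by
        simp only [pvStepA]
        rw [if_neg hi0, if_pos hn2, show k + 1 - 1 = k by omega]
      rw [hstep]
      unfold pvInv
      rw [if_pos hi1]
      dsimp only
      refine ⟨?_, ?_, hle hkn, fun _ => hL2.symm⟩
      · rw [show k + 1 - 1 = k by omega]
        exact hme'
      · have hP : pvP nums (k+1+1) = pvL nums (k+1+1) := by
          unfold pvP; rw [if_pos hn2]
        rw [hP, hL2, hmo, hlo, hrec, pvCost_interior nums k (by omega) hkn]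
        unfold pvL
        omega
    · have hstep : pvStepA nums (me, mo, le, lo) (k+1) =
        (me, mo + max 0 (nums.getD k 0 - nums.getD (k+1) 0 - lo + 1), le, lo) := by
        simp only [pvStepA]
        rw [if_neg hi0, if_neg hn2, show k + 1 - 1 = k by omega]
      rw [hstep]
      unfold pvInv
      rw [if_pos hi1]
      dsimp only
      refine ⟨?_, ?_, hle hkn, fun hc => absurd hc hn2⟩
      · rw [show k + 1 - 1 = k by omega]
        exact hme'
      · have hP : pvP nums (k+1+1) = 0 := by
          unfold pvP; rw [if_neg hn2]
        rw [hP, hmo, hlo, hrec, pvCost_interior nums k (by omega) hkn]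
        unfold pvL
        omega

theorem pvInv_base (nums : List Int) (h : 2 ≤ nums.length) :
    pvInv nums 1 ((List.range' 1 1).foldl (pvStepA nums) (pvInitA nums)) := by
  have hinit : pvInitA nums = (pvL nums 1, 0, pvL nums 1, 0) := by
    unfold pvInitA pvL
    rw [if_pos (by omega : 1 < nums.length)]
  have hS : pvS nums 0 1 = pvCost nums 0 := by
    unfold pvS
    simp [List.range_succ]
  rw [List.range'_one, List.foldl_cons, List.foldl_nil, hinit]
  by_cases h2 : 1 + 1 < nums.length
  · have hstep : pvStepA nums (pvL nums 1, 0, pvL nums 1, 0) 1 =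
      (pvL nums 1,
       0 + max 0 (nums.getD 0 0 - nums.getD 1 0 - 0 + 1)
         + max 0 (nums.getD (1+1) 0 - nums.getD 1 0 + 1),
       pvL nums 1,
       max 0 (nums.getD (1+1) 0 - nums.getD 1 0 + 1)) := by
      simp only [pvStepA]
      rw [if_neg (by omega : ¬ ((1:Nat) % 2 = 0)), if_pos h2,
        show (1:Nat) - 1 = 0 from rfl]
    rw [hstep]
    unfold pvInv
    rw [if_pos (by omega : (1:Nat) % 2 = 1)]
    dsimp only
    refine ⟨?_, ?_, rfl, fun _ => ?_⟩
    · rw [show pvS nums 1 (1-1) = 0 from rfl, zero_add]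
    · rw [hS, pvCost_zero nums (by omega)]
      unfold pvP
      rw [if_pos h2]
      unfold pvL
      rw [show (1:Nat) + 1 - 1 = 1 from rfl]
      omega
    · unfold pvL
      rw [show (1:Nat) + 1 - 1 = 1 from rfl]
  · have hstep : pvStepA nums (pvL nums 1, 0, pvL nums 1, 0) 1 =
      (pvL nums 1,
       0 + max 0 (nums.getD 0 0 - nums.getD 1 0 - 0 + 1),
       pvL nums 1,
       0) := by
      simp only [pvStepA]
      rw [if_neg (by omega : ¬ ((1:Nat) % 2 = 0)), if_neg h2,
        show (1:Nat) - 1 = 0 from rfl]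
    rw [hstep]
    unfold pvInv
    rw [if_pos (by omega : (1:Nat) % 2 = 1)]
    dsimp only
    refine ⟨?_, ?_, rfl, fun hc => absurd hc h2⟩
    · rw [show pvS nums 1 (1-1) = 0 from rfl, zero_add]
    · rw [hS, pvCost_zero nums (by omega)]
      unfold pvP
      rw [if_neg h2]
      omega

theorem pvInv_all (nums : List Int) (k : Nat) (h1 : 1 ≤ k) (h2 : k ≤ nums.length - 1)
    (hn : 2 ≤ nums.length) :
    pvInv nums k ((List.range' 1 k).foldl (pvStepA nums) (pvInitA nums)) := by
  induction k with
  | zero => omega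
  | succ k ih =>
    rcases Nat.eq_or_lt_of_le h1 with he | hlt
    · rw [← he]; exact pvInv_base nums hn
    · have hk1 : 1 ≤ k := by omega
      have hkn : k + 1 < nums.length := by omega
      rw [List.range'_1_concat, Nat.add_comm 1 k, List.foldl_append, List.foldl_cons,
        List.foldl_nil]
      exact pvInv_step nums k _ hk1 hkn (ih hk1 (by omega))

-- full sums extracted from the invariant at the last index
theorem pvFinal (nums : List Int) (hn : 2 ≤ nums.length) :
    (((List.range' 1 (nums.length - 1)).foldl (pvStepA nums) (pvInitA nums)).1
      = pvS nums 1 nums.length) ∧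
    (((List.range' 1 (nums.length - 1)).foldl (pvStepA nums) (pvInitA nums)).2.1
      = pvS nums 0 nums.length) := by
  have hinv := pvInv_all nums (nums.length - 1) (by omega) (by omega) hn
  set n := nums.length with hn'
  set st := (List.range' 1 (n - 1)).foldl (pvStepA nums) (pvInitA nums) with hst
  unfold pvInv at hinv
  have hLlast : pvL nums (n-1) = pvCost nums (n-1) :=
    (pvCost_last nums (n-1) (by omega) (by omega)).symm
  have hP0 : pvP nums (n-1+1) = 0 := by
    unfold pvP; rw [if_neg (by omega : ¬ (n - 1 + 1 < nums.length))]
  by_cases hp : (n-1) % 2 = 1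
  · rw [if_pos hp] at hinv
    obtain ⟨hme, hmo, -, -⟩ := hinv
    constructor
    · have h1 := pvS_two nums 1 (n-1) (by omega) hp
      rw [show n - 1 + 1 = n by omega] at h1
      rw [hme, hLlast, h1]
    · have h0 := pvS_skip nums 0 (n-1) (by omega)
      rw [show n - 1 + 1 = n by omega] at h0
      rw [hmo, hP0, add_zero, h0]
  · rw [if_neg hp] at hinv
    obtain ⟨hme, hmo, -, -⟩ := hinv
    constructor
    · have h1 := pvS_skip nums 1 (n-1) hp
      rw [show n - 1 + 1 = n by omega] at h1
      rw [hme, hP0, add_zero, h1]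
    · have h0 := pvS_two nums 0 (n-1) (by omega) (by omega)
      rw [show n - 1 + 1 = n by omega] at h0
      rw [hmo, hLlast, h0]

-- ===== VERDICT (by name: the statement is the Claim_ definition above) =====
theorem solution_769_3_spec : Claim_equal_solution_769_3 := by
  unfold Claim_equal_solution_769_3
  intro nums _
  unfold Spec_solution_769_3
  by_cases hn : 2 ≤ nums.length
  · obtain ⟨h1, h0⟩ := pvFinal nums hn
    unfold solution_769_3 solution_769_3_alt
    show min _ _ = _
    rw [h1, h0]
    show _ = min (pvS nums 0 nums.length) (pvS nums 1 nums.length)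
    exact min_comm _ _
  · cases nums with
    | nil => decide
    | cons a t =>
      cases t with
      | nil =>
        unfold solution_769_3 solution_769_3_alt pvParityCost pvCost pvInitA
        norm_num [List.range_succ]
      | cons b t2 =>
        exfalso
        apply hn
        simp only [List.length_cons]
        omega
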